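-- pv_equiv track=rewrite | github.com/Adiaslow/Pycroscope | docs/examples/sample_workload.py | overly_complex_function
-- ===== SOURCE A (Python) =====
-- def overly_complex_function(param1, param2, param3, param4, param5, param6, param7):
--     """
--     Function with too many parameters and high cyclomatic complexity.
--     Pattern analysis will detect both issues.
--     """
--     result = 0
--
--     # High cyclomatic complexity - deeply nested conditions
--     if param1 > 0:
--         if param2 > 0:
--             if param3 > 0:
--                 if param4 > 0:
--                     if param5 > 0:
--                         if param6 > 0:
--                             if param7 > 0:
--                                 result = (
--                                     param1
--                                     + param2
--                                     + param3
--                                     + param4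
--                                     + param5
--                                     + param6
--                                     + param7
--                                 )
--                             else:
--                                 result = (
--                                     param1 + param2 + param3 + param4 + param5 + param6
--                                 )
--                         else:
--                             result = param1 + param2 + param3 + param4 + param5
--                     else:
--                         result = param1 + param2 + param3 + param4
--                 else:
--                     result = param1 + param2 + param3
--             else:
--                 result = param1 + param2
--         else:
--             result = param1
--
--     # More unnecessary complexity
--     for i in range(10):
--         for j in range(10):
--             if i + j == result % 10:
--                 result += 1
--
--     return result
-- ===== SOURCE B (Python) =====
-- def overly_complex_function(param1, param2, param3, param4, param5, param6, param7):
--     result = 0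
--     for p in (param1, param2, param3, param4, param5, param6, param7):
--         if p <= 0:
--             break
--         result += p
--     # the fixed 10x10 adjustment loop always rounds result up to the next
--     # positive multiple of 10 (adds 10 - result % 10, then 9 more ones)
--     return (result // 10) * 10 + 10
-- ===== Notes on version B (the rewrite author's own statement) =====
-- stated objective: faster
-- what changed: B sums the leading positive prefix of the parameters with a single break-loop instead of 7-level nested ifs, and replaces the fixed 10x10 adjustment loop by the closed form (result // 10) * 10 + 10, which it provably equals.
import Mathlib
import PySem

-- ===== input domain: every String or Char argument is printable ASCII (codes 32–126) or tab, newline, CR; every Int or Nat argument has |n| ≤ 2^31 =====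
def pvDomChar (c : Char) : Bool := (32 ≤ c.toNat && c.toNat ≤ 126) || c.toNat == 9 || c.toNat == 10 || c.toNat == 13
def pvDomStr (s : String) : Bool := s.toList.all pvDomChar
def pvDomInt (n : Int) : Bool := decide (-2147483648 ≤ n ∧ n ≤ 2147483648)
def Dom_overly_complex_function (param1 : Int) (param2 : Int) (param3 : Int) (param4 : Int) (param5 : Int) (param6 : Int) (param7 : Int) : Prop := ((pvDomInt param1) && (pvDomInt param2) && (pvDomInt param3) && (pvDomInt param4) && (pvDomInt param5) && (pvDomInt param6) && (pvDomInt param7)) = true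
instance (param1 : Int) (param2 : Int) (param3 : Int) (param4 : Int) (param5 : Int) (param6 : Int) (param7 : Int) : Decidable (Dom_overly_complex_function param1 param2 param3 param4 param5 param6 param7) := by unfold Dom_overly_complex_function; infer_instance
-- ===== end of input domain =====

-- B replaces the 7-level nested conditional by a break-loop prefix sum and the
-- fixed 10x10 adjustment loop by the closed form (result // 10) * 10 + 10 (objective: faster by a constant factor).

-- ===== PORT A =====
def overly_complex_function (param1 : Int) (param2 : Int) (param3 : Int) (param4 : Int) (param5 : Int) (param6 : Int) (param7 : Int) : Int :=
  let result : Int :=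
    if param1 > 0 then
      if param2 > 0 then
        if param3 > 0 then
          if param4 > 0 then
            if param5 > 0 then
              if param6 > 0 then
                if param7 > 0 then
                  param1 + param2 + param3 + param4 + param5 + param6 + param7
                else
                  param1 + param2 + param3 + param4 + param5 + param6
              else
                param1 + param2 + param3 + param4 + param5
            else
              param1 + param2 + param3 + param4
          else
            param1 + param2 + param3
        else
          param1 + param2
      else
        param1
    else 0
  (PySem.List.pyRange 0 10 1).foldl (fun r i =>
    (PySem.List.pyRange 0 10 1).foldl (fun r j =>
      if i + j = PySem.Int.mod r 10 then r + 1 else r) r) result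

-- ===== PORT B =====
-- the break-loop over (param1, …, param7): sum of the leading strictly positive prefix
def pvPosPrefixSum (acc : Int) (ps : List Int) : Int :=
  match ps with
  | [] => acc
  | p :: rest => if p ≤ 0 then acc else pvPosPrefixSum (acc + p) rest

def overly_complex_function_alt (param1 : Int) (param2 : Int) (param3 : Int) (param4 : Int) (param5 : Int) (param6 : Int) (param7 : Int) : Int :=
  let result := pvPosPrefixSum 0 [param1, param2, param3, param4, param5, param6, param7]
  PySem.Int.floordiv result 10 * 10 + 10

-- ===== PRECONDITION & SPEC =====
def Spec_overly_complex_function (param1 : Int) (param2 : Int) (param3 : Int) (param4 : Int) (param5 : Int) (param6 : Int) (param7 : Int) (out : Int) : Prop := out = overly_complex_function_alt param1 param2 param3 param4 param5 param6 param7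
instance (param1 : Int) (param2 : Int) (param3 : Int) (param4 : Int) (param5 : Int) (param6 : Int) (param7 : Int) (out : Int) : Decidable (Spec_overly_complex_function param1 param2 param3 param4 param5 param6 param7 out) := by unfold Spec_overly_complex_function; infer_instance

-- ===== CLAIM (what is proved, stated in full; the proofs are below) =====
def Claim_equal_overly_complex_function : Prop := ∀ (param1 : Int) (param2 : Int) (param3 : Int) (param4 : Int) (param5 : Int) (param6 : Int) (param7 : Int), Dom_overly_complex_function param1 param2 param3 param4 param5 param6 param7 → Spec_overly_complex_function param1 param2 param3 param4 param5 param6 param7 (overly_complex_function param1 param2 param3 param4 param5 param6 param7)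

-- ===== LEMMAS AND PROOFS =====

-- A's adjustment loop, abstracted over its starting value (proof helper)
def pvF (r : Int) : Int :=
  (PySem.List.pyRange 0 10 1).foldl (fun r i =>
    (PySem.List.pyRange 0 10 1).foldl (fun r j =>
      if i + j = PySem.Int.mod r 10 then r + 1 else r) r) r

-- A's nested-conditional result, as a named helper (definitionally A's first phase)
def pvPre (param1 param2 param3 param4 param5 param6 param7 : Int) : Int :=
  if param1 > 0 then
    if param2 > 0 then
      if param3 > 0 then
        if param4 > 0 then
          if param5 > 0 then
            if param6 > 0 then
              if param7 > 0 then
                param1 + param2 + param3 + param4 + param5 + param6 + param7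
              else
                param1 + param2 + param3 + param4 + param5 + param6
            else
              param1 + param2 + param3 + param4 + param5
          else
            param1 + param2 + param3 + param4
        else
          param1 + param2 + param3
      else
        param1 + param2
    else
      param1
  else 0

theorem pvA_as_F (p1 p2 p3 p4 p5 p6 p7 : Int) :
    overly_complex_function p1 p2 p3 p4 p5 p6 p7 = pvF (pvPre p1 p2 p3 p4 p5 p6 p7) := rfl

theorem pvAlt_val (p1 p2 p3 p4 p5 p6 p7 : Int) :
    overly_complex_function_alt p1 p2 p3 p4 p5 p6 p7
      = PySem.Int.floordiv (pvPosPrefixSum 0 [p1, p2, p3, p4, p5, p6, p7]) 10 * 10 + 10 := rfl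

set_option maxHeartbeats 2000000 in
theorem pvPre_eq (p1 p2 p3 p4 p5 p6 p7 : Int) :
    pvPre p1 p2 p3 p4 p5 p6 p7 = pvPosPrefixSum 0 [p1, p2, p3, p4, p5, p6, p7] := by
  unfold pvPre
  simp only [pvPosPrefixSum]
  split_ifs <;> omega

theorem pvPre_nonneg (p1 p2 p3 p4 p5 p6 p7 : Int) : 0 ≤ pvPre p1 p2 p3 p4 p5 p6 p7 := by
  unfold pvPre
  split_ifs <;> omega

theorem pvMod_shift (r : Int) : PySem.Int.mod (r + 10) 10 = PySem.Int.mod r 10 := by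
  rw [PySem.Int.mod_eq_emod_of_pos (by norm_num), PySem.Int.mod_eq_emod_of_pos (by norm_num)]
  omega

theorem pvInner_shift (l : List Int) (i : Int) : ∀ r : Int,
    l.foldl (fun r j => if i + j = PySem.Int.mod r 10 then r + 1 else r) (r + 10)
      = l.foldl (fun r j => if i + j = PySem.Int.mod r 10 then r + 1 else r) r + 10 := by
  induction l with
  | nil => intro r; rfl
  | cons j rest ih =>
    intro r
    simp only [List.foldl_cons]
    rw [pvMod_shift]
    by_cases h : i + j = PySem.Int.mod r 10
    · rw [if_pos h, if_pos h, show r + 10 + 1 = (r + 1) + 10 by ring, ih]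
    · rw [if_neg h, if_neg h, ih]

theorem pvOuter_shift (l : List Int) : ∀ r : Int,
    l.foldl (fun r i => (PySem.List.pyRange 0 10 1).foldl
        (fun r j => if i + j = PySem.Int.mod r 10 then r + 1 else r) r) (r + 10)
      = l.foldl (fun r i => (PySem.List.pyRange 0 10 1).foldl
        (fun r j => if i + j = PySem.Int.mod r 10 then r + 1 else r) r) r + 10 := by
  induction l with
  | nil => intro r; rfl
  | cons i rest ih =>
    intro r
    simp only [List.foldl_cons]
    rw [pvInner_shift, ih]

theorem pvF_shift (r : Int) : pvF (r + 10) = pvF r + 10 := pvOuter_shift _ r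

theorem pvF_shift_mul (n : Nat) : ∀ r : Int, pvF (r + 10 * n) = pvF r + 10 * n := by
  induction n with
  | zero => intro r; simp
  | succ k ih =>
    intro r
    have h1 : r + 10 * ((k : Int) + 1) = (r + 10) + 10 * k := by ring
    push_cast
    rw [h1, ih (r + 10), pvF_shift]
    ring

set_option maxRecDepth 10000 in
theorem pvF_small (s : Int) (h0 : 0 ≤ s) (h1 : s < 10) : pvF s = 10 := by
  interval_cases s <;> decide

theorem pvF_formula (r : Int) (hr : 0 ≤ r) :
    pvF r = PySem.Int.floordiv r 10 * 10 + 10 := by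
  have hq : 0 ≤ r / 10 := Int.ediv_nonneg hr (by norm_num)
  obtain ⟨n, hn⟩ := Int.eq_ofNat_of_zero_le hq
  have hmod : 0 ≤ r % 10 ∧ r % 10 < 10 := by omega
  have hrsplit : r = r % 10 + 10 * n := by omega
  rw [PySem.Int.floordiv_eq_ediv_of_pos (by norm_num), hn, hrsplit,
    pvF_shift_mul n (r % 10), pvF_small _ hmod.1 hmod.2]
  ring

-- ===== VERDICT (by name: the statement is the Claim_ definition above) =====
theorem overly_complex_function_spec : Claim_equal_overly_complex_function := by
  intro p1 p2 p3 p4 p5 p6 p7 _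
  unfold Spec_overly_complex_function
  rw [pvA_as_F, pvAlt_val, ← pvPre_eq, pvF_formula _ (pvPre_nonneg p1 p2 p3 p4 p5 p6 p7)]
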